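-- pv_equiv track=rewrite | github.com/d25037/trading25 | apps/bt/src/application/services/strategy_dataset_metadata.py | canonicalize_market_list
-- ===== SOURCE A (Python) =====
-- _PREFERRED_MARKET_ORDER = ("prime", "standard", "growth")
--
-- _MARKET_ALIAS_TO_CANONICAL = {
--     "prime": "prime",
--     "standard": "standard",
--     "growth": "growth",
--     "0111": "prime",
--     "0112": "standard",
--     "0113": "growth",
-- }
--
-- def canonicalize_market_list(markets: list[str]) -> list[str]:
--     canonical: list[str] = []
--     seen: set[str] = set()
--
--     for preferred in _PREFERRED_MARKET_ORDER:
--         if preferred in {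
--             _MARKET_ALIAS_TO_CANONICAL.get(market.lower(), market)
--             for market in markets
--         }:
--             canonical.append(preferred)
--             seen.add(preferred)
--
--     for market in markets:
--         normalized = _MARKET_ALIAS_TO_CANONICAL.get(market.lower(), market)
--         if normalized in seen:
--             continue
--         canonical.append(normalized)
--         seen.add(normalized)
--
--     return canonical
-- ===== SOURCE B (Python) =====
-- _PREFERRED_MARKET_ORDER = ("prime", "standard", "growth")
--
-- _MARKET_ALIAS_TO_CANONICAL = {
--     "prime": "prime",
--     "standard": "standard",
--     "growth": "growth",
--     "0111": "prime",
--     "0112": "standard",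
--     "0113": "growth",
-- }
--
--
-- def canonicalize_market_list(markets: list[str]) -> list[str]:
--     unique = list(dict.fromkeys(
--         _MARKET_ALIAS_TO_CANONICAL.get(m.lower(), m) for m in markets))
--     rank = {m: i for i, m in enumerate(_PREFERRED_MARKET_ORDER)}
--     return sorted(unique, key=lambda m: rank.get(m, len(_PREFERRED_MARKET_ORDER)))
-- ===== Notes on version B (the rewrite author's own statement) =====
-- stated objective: alternative
-- what changed: B dedups the normalized names once with dict.fromkeys and then produces the order by a single stable sort on a priority key (rank in the preferred tuple, else a sentinel rank), instead of A's per-preferred rescan loop (which rebuilds the normalized set for each preferred market) followed by a stateful skip loop.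
import Mathlib
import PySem

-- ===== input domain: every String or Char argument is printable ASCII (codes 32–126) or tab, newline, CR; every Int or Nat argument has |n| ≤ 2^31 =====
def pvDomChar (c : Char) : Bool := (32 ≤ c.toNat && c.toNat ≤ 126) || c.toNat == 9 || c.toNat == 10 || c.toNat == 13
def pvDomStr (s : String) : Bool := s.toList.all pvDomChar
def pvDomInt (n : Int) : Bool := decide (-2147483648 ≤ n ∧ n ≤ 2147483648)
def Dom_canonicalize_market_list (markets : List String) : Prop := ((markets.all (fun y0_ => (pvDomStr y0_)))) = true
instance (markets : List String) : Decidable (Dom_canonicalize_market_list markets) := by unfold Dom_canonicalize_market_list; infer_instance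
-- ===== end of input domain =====

-- B dedups the normalized names once (dict.fromkeys) and then obtains the final order by one
-- stable sort on a priority key, instead of A's per-preferred rescan plus a stateful skip loop;
-- objective: alternative.

-- shared module-level constants (same in both Pythons)
def pvPreferred : List String := ["prime", "standard", "growth"]

def pvAlias : PySem.Dict String String :=
  PySem.Dict.ofList [("prime", "prime"), ("standard", "standard"), ("growth", "growth"),
                     ("0111", "prime"), ("0112", "standard"), ("0113", "growth")]

-- _MARKET_ALIAS_TO_CANONICAL.get(market.lower(), market)
def pvNorm (market : String) : String := PySem.Dict.getD pvAlias (PySem.Str.lower market) market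

-- ===== PORT A =====
-- second for-loop of A: appends normalized markets not yet seen
def pvLoopA : List String → List String → PySem.Set String → List String
  | [], canonical, _ => canonical
  | market :: rest, canonical, seen =>
    let normalized := pvNorm market
    if PySem.Set.contains seen normalized then pvLoopA rest canonical seen
    else pvLoopA rest (canonical ++ [normalized]) (PySem.Set.add seen normalized)

def canonicalize_market_list (markets : List String) : List String :=
  -- first loop: for preferred in _PREFERRED_MARKET_ORDER, membership in the set comprehension
  let st := pvPreferred.foldl
    (fun (st : List String × PySem.Set String) preferred =>
      if PySem.Set.contains (PySem.Set.ofList (markets.map pvNorm)) preferred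
      then (st.1 ++ [preferred], PySem.Set.add st.2 preferred) else st)
    ([], PySem.Set.empty)
  pvLoopA markets st.1 st.2

-- ===== PORT B =====
def canonicalize_market_list_alt (markets : List String) : List String :=
  -- unique = list(dict.fromkeys(norm(m) for m in markets))
  let unique := PySem.List.dedup (markets.map pvNorm)
  -- rank = {m: i for i, m in enumerate(_PREFERRED_MARKET_ORDER)}
  let rank := PySem.Dict.ofList ((PySem.List.enumerate pvPreferred).map (fun p => (p.2, p.1)))
  -- sorted(unique, key=lambda m: rank.get(m, len(_PREFERRED_MARKET_ORDER)))
  PySem.List.sorted unique (fun m => PySem.Dict.getD rank m (pvPreferred.length : Int))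

-- ===== PRECONDITION & SPEC =====
def Spec_canonicalize_market_list (markets : List String) (out : List String) : Prop := out = canonicalize_market_list_alt markets
instance (markets : List String) (out : List String) : Decidable (Spec_canonicalize_market_list markets out) := by unfold Spec_canonicalize_market_list; infer_instance

-- ===== CLAIM (what is proved, stated in full; the proofs are below) =====
def Claim_equal_canonicalize_market_list : Prop := ∀ (markets : List String), Dom_canonicalize_market_list markets → Spec_canonicalize_market_list markets (canonicalize_market_list markets)

-- ===== LEMMAS AND PROOFS =====

-- proof-side name for B's priority key (definitionally the lambda in the port)
def pvKeyB (m : String) : Int :=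
  PySem.Dict.getD (PySem.Dict.ofList ((PySem.List.enumerate pvPreferred).map (fun p => (p.2, p.1))))
    m (pvPreferred.length : Int)

-- the same key written by cases
def pvK (m : String) : Int :=
  if m = "prime" then 0 else if m = "standard" then 1 else if m = "growth" then 2 else 3

-- B's one-pass fold over the input used to characterise A (proof-side only)
def pvStepB : List String × PySem.Set String → String → List String × PySem.Set String :=
  fun st market =>
    let normalized := pvNorm market
    if PySem.Set.contains st.2 normalized then st
    else (st.1 ++ [normalized], PySem.Set.add st.2 normalized)

-- A's first-loop step, named for the proofs
def pvStep1 (markets : List String) : List String × PySem.Set String → String → List String × PySem.Set String :=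
  fun st preferred =>
    if PySem.Set.contains (PySem.Set.ofList (markets.map pvNorm)) preferred
    then (st.1 ++ [preferred], PySem.Set.add st.2 preferred) else st

theorem pvA_eq (markets : List String) :
    canonicalize_market_list markets =
      pvLoopA markets (List.foldl (pvStep1 markets) ([], PySem.Set.empty) pvPreferred).1
        (List.foldl (pvStep1 markets) ([], PySem.Set.empty) pvPreferred).2 := rfl

theorem pvB_eq (markets : List String) :
    canonicalize_market_list_alt markets =
      PySem.List.sorted (PySem.Set.ofList (markets.map pvNorm)) pvKeyB := rfl

set_option maxRecDepth 4000 in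
theorem pvKeyB_eq : ∀ m, pvKeyB m = pvK m := by
  intro m
  unfold pvKeyB pvK
  have hi : (PySem.Dict.ofList ((PySem.List.enumerate pvPreferred).map (fun p => (p.2, p.1)))).items
      = [("prime", (0 : Int)), ("standard", 1), ("growth", 2)] := by rfl
  by_cases h1 : m = "prime"
  · subst h1; decide
  · by_cases h2 : m = "standard"
    · subst h2; decide
    · by_cases h3 : m = "growth"
      · subst h3; decide
      · rw [PySem.Dict.getD, PySem.Dict.get?, hi,
            List.find?_cons_of_neg (by simp only [beq_iff_eq]; exact fun h => h1 h.symm),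
            List.find?_cons_of_neg (by simp only [beq_iff_eq]; exact fun h => h2 h.symm),
            List.find?_cons_of_neg (by simp only [beq_iff_eq]; exact fun h => h3 h.symm), List.find?_nil]
        simp [h1, h2, h3, pvPreferred]

theorem pvK_cases (m : String) : pvK m = 0 ∨ pvK m = 1 ∨ pvK m = 2 ∨ pvK m = 3 := by
  unfold pvK; split_ifs <;> simp

theorem pvK_beq_zero (m : String) : (pvK m == (0 : Int)) = (m == "prime") := by
  unfold pvK; split_ifs <;> simp_all

theorem pvK_beq_one (m : String) : (pvK m == (1 : Int)) = (m == "standard") := by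
  unfold pvK; split_ifs <;> simp_all

theorem pvK_beq_two (m : String) : (pvK m == (2 : Int)) = (m == "growth") := by
  unfold pvK; split_ifs <;> simp_all

theorem pvK_beq_three (m : String) : (pvK m == (3 : Int)) = !(pvPreferred.contains m) := by
  unfold pvK pvPreferred; split_ifs <;> simp_all

-- insertBy equation lemmas
theorem pvInsertBy_cons (bf : String → String → Bool) (x y : String) (ys : List String) :
    PySem.List.insertBy bf x (y :: ys) =
      if bf x y then x :: y :: ys else y :: PySem.List.insertBy bf x ys := rfl

-- skip a prefix of elements the new one does not go before
theorem pvInsertBy_skip (bf : String → String → Bool) (x : String) :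
    ∀ (A C : List String), (∀ a ∈ A, bf x a = false) →
      PySem.List.insertBy bf x (A ++ C) = A ++ PySem.List.insertBy bf x C := by
  intro A
  induction A with
  | nil => intro C _; simp
  | cons a A ih =>
    intro C h
    rw [List.cons_append, pvInsertBy_cons, h a List.mem_cons_self]
    simp only [Bool.false_eq_true, if_false, List.cons_append]
    rw [ih C (fun a' ha' => h a' (List.mem_cons_of_mem _ ha'))]

-- goes before everything in C
theorem pvInsertBy_front (bf : String → String → Bool) (x : String) :
    ∀ (C : List String), (∀ c ∈ C, bf x c = true) →
      PySem.List.insertBy bf x C = x :: C := by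
  intro C h
  cases C with
  | nil => rfl
  | cons c cs => rw [pvInsertBy_cons, h c List.mem_cons_self]; rfl

theorem pvInsertBy_blocks (x : String) (A C : List String)
    (hA : ∀ a ∈ A, ¬ pvK x < pvK a) (hC : ∀ c ∈ C, pvK x < pvK c) :
    PySem.List.insertBy (fun a b => decide (pvK a < pvK b)) x (A ++ C) = A ++ x :: C := by
  rw [pvInsertBy_skip _ _ A C (fun a ha => by simp [hA a ha]),
      pvInsertBy_front _ _ C (fun c hc => by simp [hC c hc])]

-- a stable sort on the four-valued key is the concatenation of the four key-blocks
theorem pvSortedBlocks (u : List String) :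
    PySem.List.sorted u pvK =
      u.filter (fun m => pvK m == 0) ++ (u.filter (fun m => pvK m == 1) ++
        (u.filter (fun m => pvK m == 2) ++ u.filter (fun m => pvK m == 3))) := by
  induction u using List.reverseRecOn with
  | nil => rfl
  | append_singleton u x ih =>
    rw [PySem.List.sorted_eq_foldl_insertBy, List.foldl_append,
        ← PySem.List.sorted_eq_foldl_insertBy, ih]
    simp only [List.foldl_cons, List.foldl_nil, List.filter_append]
    have hmem : ∀ (i : Int) (a : String), a ∈ u.filter (fun m => pvK m == i) → pvK a = i := by
      intro i a ha
      simpa using (List.mem_filter.mp ha).2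
    rcases pvK_cases x with h | h | h | h
    · rw [pvInsertBy_blocks x (u.filter (fun m => pvK m == 0))
            (u.filter (fun m => pvK m == 1) ++ (u.filter (fun m => pvK m == 2) ++ u.filter (fun m => pvK m == 3)))
            (fun a ha => by have := hmem 0 a ha; omega)
            (fun c hc => by
              rcases List.mem_append.mp hc with hc | hc
              · have := hmem 1 c hc; omega
              rcases List.mem_append.mp hc with hc | hc
              · have := hmem 2 c hc; omega
              · have := hmem 3 c hc; omega)]
      simp [h, List.append_assoc]
    · rw [show u.filter (fun m => pvK m == 0) ++ (u.filter (fun m => pvK m == 1) ++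
            (u.filter (fun m => pvK m == 2) ++ u.filter (fun m => pvK m == 3)))
          = (u.filter (fun m => pvK m == 0) ++ u.filter (fun m => pvK m == 1)) ++
            (u.filter (fun m => pvK m == 2) ++ u.filter (fun m => pvK m == 3)) from by
            simp [List.append_assoc]]
      rw [pvInsertBy_blocks x _ _
            (fun a ha => by
              rcases List.mem_append.mp ha with ha | ha
              · have := hmem 0 a ha; omega
              · have := hmem 1 a ha; omega)
            (fun c hc => by
              rcases List.mem_append.mp hc with hc | hc
              · have := hmem 2 c hc; omega
              · have := hmem 3 c hc; omega)]
      simp [h, List.append_assoc]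
    · rw [show u.filter (fun m => pvK m == 0) ++ (u.filter (fun m => pvK m == 1) ++
            (u.filter (fun m => pvK m == 2) ++ u.filter (fun m => pvK m == 3)))
          = (u.filter (fun m => pvK m == 0) ++ (u.filter (fun m => pvK m == 1) ++
              u.filter (fun m => pvK m == 2))) ++ u.filter (fun m => pvK m == 3) from by
            simp [List.append_assoc]]
      rw [pvInsertBy_blocks x _ _
            (fun a ha => by
              rcases List.mem_append.mp ha with ha | ha
              · have := hmem 0 a ha; omega
              rcases List.mem_append.mp ha with ha | ha
              · have := hmem 1 a ha; omega
              · have := hmem 2 a ha; omega)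
            (fun c hc => by have := hmem 3 c hc; omega)]
      simp [h, List.append_assoc]
    · rw [← List.append_nil (u.filter (fun m => pvK m == 0) ++ (u.filter (fun m => pvK m == 1) ++
            (u.filter (fun m => pvK m == 2) ++ u.filter (fun m => pvK m == 3))))]
      rw [pvInsertBy_blocks x _ []
            (fun a ha => by
              rcases List.mem_append.mp ha with ha | ha
              · have := hmem 0 a ha; omega
              rcases List.mem_append.mp ha with ha | ha
              · have := hmem 1 a ha; omega
              rcases List.mem_append.mp ha with ha | ha
              · have := hmem 2 a ha; omega
              · have := hmem 3 a ha; omega)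
            (fun c hc => by cases hc)]
      simp [h, List.append_assoc]

theorem pvStepB_pos (st : List String × PySem.Set String) (x : String)
    (h : pvNorm x ∈ st.2) : pvStepB st x = st := by
  unfold pvStepB
  rw [if_pos ((PySem.Set.contains_iff _ _).mpr h)]

theorem pvStepB_neg (st : List String × PySem.Set String) (x : String)
    (h : pvNorm x ∉ st.2) : pvStepB st x = (st.1 ++ [pvNorm x], PySem.Set.add st.2 (pvNorm x)) := by
  unfold pvStepB
  rw [if_neg (fun hc => h ((PySem.Set.contains_iff _ _).mp hc))]

theorem pvStep1_pos (markets : List String) (st : List String × PySem.Set String) (p : String)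
    (h : p ∈ markets.map pvNorm) :
    pvStep1 markets st p = (st.1 ++ [p], PySem.Set.add st.2 p) := by
  unfold pvStep1
  rw [if_pos ((PySem.Set.contains_iff _ _).mpr ((PySem.Set.mem_ofList _ _).mpr h))]

theorem pvStep1_neg (markets : List String) (st : List String × PySem.Set String) (p : String)
    (h : p ∉ markets.map pvNorm) : pvStep1 markets st p = st := by
  unfold pvStep1
  rw [if_neg (fun hc => h ((PySem.Set.mem_ofList _ _).mp ((PySem.Set.contains_iff _ _).mp hc)))]

theorem pvLoopA_pos (rest : List String) (m : String) (canonical : List String)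
    (seen : PySem.Set String) (h : pvNorm m ∈ seen) :
    pvLoopA (m :: rest) canonical seen = pvLoopA rest canonical seen := by
  simp only [pvLoopA]
  rw [if_pos ((PySem.Set.contains_iff _ _).mpr h)]

theorem pvLoopA_neg (rest : List String) (m : String) (canonical : List String)
    (seen : PySem.Set String) (h : pvNorm m ∉ seen) :
    pvLoopA (m :: rest) canonical seen =
      pvLoopA rest (canonical ++ [pvNorm m]) (PySem.Set.add seen (pvNorm m)) := by
  simp only [pvLoopA]
  rw [if_neg (fun hc => h ((PySem.Set.contains_iff _ _).mp hc))]

-- B's fold: the accumulated list is a prefix, the seen set is independent of it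
theorem pvFoldB_shift (l : List String) : ∀ (u : List String) (s : PySem.Set String),
    List.foldl pvStepB (u, s) l =
      (u ++ (List.foldl pvStepB ([], s) l).1, (List.foldl pvStepB ([], s) l).2) := by
  induction l with
  | nil => intro u s; simp
  | cons m rest ih =>
    intro u s
    by_cases h : pvNorm m ∈ s
    · rw [List.foldl_cons, List.foldl_cons, pvStepB_pos _ _ h, pvStepB_pos _ _ h, ih u s]
    · rw [List.foldl_cons, List.foldl_cons, pvStepB_neg _ _ h, pvStepB_neg _ _ h]
      simp only [List.nil_append]
      rw [ih (u ++ [pvNorm m]), ih [pvNorm m]]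
      simp

-- the one-pass fold started on equal components stays diagonal and is Set.ofList of the normalized input
theorem pvFoldB_diag (l : List String) : ∀ (s : List String),
    List.foldl pvStepB (s, s) l =
      (List.foldl (fun t m => PySem.Set.add t (pvNorm m)) s l,
       List.foldl (fun t m => PySem.Set.add t (pvNorm m)) s l) := by
  induction l with
  | nil => intro s; rfl
  | cons m rest ih =>
    intro s
    rw [List.foldl_cons, List.foldl_cons]
    have hstep : pvStepB (s, s) m = (PySem.Set.add s (pvNorm m), PySem.Set.add s (pvNorm m)) := by
      unfold pvStepB PySem.Set.add
      by_cases h : pvNorm m ∈ s <;> simp [h]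
    rw [hstep, ih]

theorem pvFoldB_ofList (l : List String) :
    List.foldl pvStepB ([], PySem.Set.empty) l =
      (PySem.Set.ofList (l.map pvNorm), PySem.Set.ofList (l.map pvNorm)) := by
  have h0 : (PySem.Set.empty : PySem.Set String) = ([] : List String) := rfl
  rw [show (([], PySem.Set.empty) : List String × PySem.Set String) = (([] : List String), ([] : List String)) from rfl]
  rw [pvFoldB_diag l []]
  unfold PySem.Set.ofList
  rw [List.foldl_map]
  rfl

-- A's first loop: the produced list is a filter of the preferred order
theorem pvFold1_fst (markets : List String) (ps : List String) :
    ∀ (st : List String × PySem.Set String),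
    (List.foldl (pvStep1 markets) st ps).1 =
      st.1 ++ ps.filter (fun p => PySem.Set.contains (PySem.Set.ofList (markets.map pvNorm)) p) := by
  induction ps with
  | nil => intro st; simp
  | cons p rest ih =>
    intro st
    rw [List.foldl_cons, List.filter_cons]
    by_cases h : p ∈ markets.map pvNorm
    · rw [pvStep1_pos _ _ _ h, ih,
          if_pos ((PySem.Set.contains_iff _ _).mpr ((PySem.Set.mem_ofList _ _).mpr h))]
      simp
    · rw [pvStep1_neg _ _ _ h, ih,
          if_neg (fun hc => h ((PySem.Set.mem_ofList _ _).mp ((PySem.Set.contains_iff _ _).mp hc)))]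

-- A's first loop: membership in the seen set it builds
theorem pvFold1_mem (markets : List String) (ps : List String) :
    ∀ (st : List String × PySem.Set String) (x : String),
    x ∈ (List.foldl (pvStep1 markets) st ps).2 ↔
      x ∈ st.2 ∨ (x ∈ ps ∧ x ∈ markets.map pvNorm) := by
  induction ps with
  | nil => intro st x; simp
  | cons p rest ih =>
    intro st x
    rw [List.foldl_cons]
    by_cases h : p ∈ markets.map pvNorm
    · rw [pvStep1_pos _ _ _ h, ih]
      simp only [PySem.Set.mem_add, List.mem_cons]
      constructor
      · rintro ((hx | hx) | hx)
        exacts [Or.inl hx, Or.inr ⟨Or.inl hx, hx ▸ h⟩, Or.inr ⟨Or.inr hx.1, hx.2⟩]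
      · rintro (hx | ⟨hx | hx, hx2⟩)
        exacts [Or.inl (Or.inl hx), Or.inl (Or.inr hx), Or.inr ⟨hx, hx2⟩]
    · rw [pvStep1_neg _ _ _ h, ih]
      simp only [List.mem_cons]
      constructor
      · rintro (hx | hx); exacts [Or.inl hx, Or.inr ⟨Or.inr hx.1, hx.2⟩]
      · rintro (hx | ⟨hx | hx, hx2⟩)
        exacts [Or.inl hx, absurd (hx ▸ hx2) h, Or.inr ⟨hx, hx2⟩]

-- main invariant: A's second loop equals the non-preferred filter of the deduped list
theorem pvMain (l : List String) : ∀ (acc : List String) (sA sB : PySem.Set String),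
    (∀ x, x ∈ sB → x ∈ sA) →
    (∀ x, x ∈ sA → x ∈ sB ∨ x ∈ pvPreferred) →
    (∀ m ∈ l, pvNorm m ∈ pvPreferred → pvNorm m ∈ sA) →
    pvLoopA l acc sA =
      acc ++ ((List.foldl pvStepB ([], sB) l).1.filter fun m => !(pvPreferred.contains m)) := by
  induction l with
  | nil => intro acc sA sB _ _ _; simp [pvLoopA]
  | cons m rest ih =>
    intro acc sA sB inv1 inv2 inv3
    rw [List.foldl_cons]
    by_cases hA : pvNorm m ∈ sA
    · rw [pvLoopA_pos _ _ _ _ hA]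
      by_cases hB : pvNorm m ∈ sB
      · rw [pvStepB_pos _ _ hB]
        exact ih acc sA sB inv1 inv2 (fun m' hm' => inv3 m' (List.mem_cons_of_mem _ hm'))
      · have hmP : pvNorm m ∈ pvPreferred := (inv2 _ hA).resolve_left hB
        rw [pvStepB_neg _ _ hB]
        rw [pvFoldB_shift]
        simp only [List.nil_append, List.filter_append]
        have hdrop : List.filter (fun m => !(pvPreferred.contains m)) [pvNorm m] = [] := by
          simp only [List.filter_cons, List.filter_nil]
          rw [List.contains_iff_mem.mpr hmP]
          rfl
        rw [hdrop, List.nil_append]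
        refine ih acc sA (PySem.Set.add sB (pvNorm m)) ?_ ?_
          (fun m' hm' => inv3 m' (List.mem_cons_of_mem _ hm'))
        · intro x hx
          rcases (PySem.Set.mem_add _ _ _).mp hx with hx | hx
          exacts [inv1 x hx, hx ▸ hA]
        · intro x hx
          rcases inv2 x hx with hx' | hx'
          · exact Or.inl ((PySem.Set.mem_add _ _ _).mpr (Or.inl hx'))
          · exact Or.inr hx'
    · have hmB : pvNorm m ∉ sB := fun hc => hA (inv1 _ hc)
      have hmP : pvNorm m ∉ pvPreferred := fun hc => hA (inv3 m List.mem_cons_self hc)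
      rw [pvLoopA_neg _ _ _ _ hA, pvStepB_neg _ _ hmB]
      rw [pvFoldB_shift]
      simp only [List.nil_append, List.filter_append]
      have hkeep : List.filter (fun m => !(pvPreferred.contains m)) [pvNorm m] = [pvNorm m] := by
        simp only [List.filter_cons, List.filter_nil]
        rw [(by simp [hmP] : pvPreferred.contains (pvNorm m) = false)]
        rfl
      rw [hkeep]
      rw [ih (acc ++ [pvNorm m]) (PySem.Set.add sA (pvNorm m)) (PySem.Set.add sB (pvNorm m))
            ?_ ?_ ?_]
      · simp
      · intro x hx
        rcases (PySem.Set.mem_add _ _ _).mp hx with hx | hx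
        · exact (PySem.Set.mem_add _ _ _).mpr (Or.inl (inv1 x hx))
        · exact (PySem.Set.mem_add _ _ _).mpr (Or.inr hx)
      · intro x hx
        rcases (PySem.Set.mem_add _ _ _).mp hx with hx | hx
        · rcases inv2 x hx with hx' | hx'
          · exact Or.inl ((PySem.Set.mem_add _ _ _).mpr (Or.inl hx'))
          · exact Or.inr hx'
        · exact Or.inl ((PySem.Set.mem_add _ _ _).mpr (Or.inr hx))
      · intro m' hm' hP
        exact (PySem.Set.mem_add _ _ _).mpr (Or.inl (inv3 m' (List.mem_cons_of_mem _ hm') hP))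

-- the preferred blocks of the nodup deduped list, by cases on membership
theorem pvBlockSingleton (u : List String) (hu : u.Nodup) (a : String) :
    u.filter (fun m => m == a) = if a ∈ u then [a] else [] := by
  rw [List.filter_beq]
  by_cases h : a ∈ u
  · rw [if_pos h, List.count_eq_one_of_mem hu h]; rfl
  · rw [if_neg h, List.count_eq_zero_of_not_mem h]; rfl

-- ===== VERDICT (by name: the statement is the Claim_ definition above) =====
theorem canonicalize_market_list_spec : Claim_equal_canonicalize_market_list := by
  intro markets _
  unfold Spec_canonicalize_market_list
  rw [pvA_eq, pvB_eq]
  have hkf : pvKeyB = pvK := funext pvKeyB_eq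
  rw [hkf]
  set u := PySem.Set.ofList (markets.map pvNorm) with hu
  have hnd : u.Nodup := PySem.Set.nodup_ofList _
  have hs0 := pvFold1_mem markets pvPreferred ([], PySem.Set.empty)
  rw [pvMain markets _ _ PySem.Set.empty
        (by intro x hx; cases hx)
        (by
          intro x hx
          rcases (hs0 x).mp hx with hx' | hx'
          · cases hx'
          · exact Or.inr hx'.1)
        (by
          intro m hm hP
          exact (hs0 (pvNorm m)).mpr (Or.inr ⟨hP, List.mem_map_of_mem hm⟩))]
  rw [pvFold1_fst markets pvPreferred ([], PySem.Set.empty)]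
  simp only [List.nil_append]
  rw [pvFoldB_ofList markets]
  rw [pvSortedBlocks u]
  have hb0 : u.filter (fun m => pvK m == 0) = if "prime" ∈ u then ["prime"] else [] := by
    rw [List.filter_congr (fun m _ => pvK_beq_zero m)]
    exact pvBlockSingleton u hnd "prime"
  have hb1 : u.filter (fun m => pvK m == 1) = if "standard" ∈ u then ["standard"] else [] := by
    rw [List.filter_congr (fun m _ => pvK_beq_one m)]
    exact pvBlockSingleton u hnd "standard"
  have hb2 : u.filter (fun m => pvK m == 2) = if "growth" ∈ u then ["growth"] else [] := by
    rw [List.filter_congr (fun m _ => pvK_beq_two m)]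
    exact pvBlockSingleton u hnd "growth"
  have hb3 : u.filter (fun m => pvK m == 3) = u.filter (fun m => !(pvPreferred.contains m)) := by
    exact List.filter_congr (fun m _ => pvK_beq_three m)
  rw [hb0, hb1, hb2, hb3]
  show pvPreferred.filter (fun p => PySem.Set.contains u p) ++ _ = _
  simp only [pvPreferred, List.filter_cons, List.filter_nil]
  by_cases h1 : "prime" ∈ u <;> by_cases h2 : "standard" ∈ u <;> by_cases h3 : "growth" ∈ u <;>
    simp [h1, h2, h3, ← hu]
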